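-- pv_equiv track=rewrite | github.com/pzelasko/daseg | daseg/topic_seg_utils/prepare_concataug_data.py | obtain_smooth_boundaries
-- ===== SOURCE A (Python) =====
-- def obtain_smooth_boundaries(doc_labels):
--     previous_topic_ind = None
--     previous_topic = None
--
--     for ind,topic in enumerate(doc_labels):
--         if (topic != 'I-') and (topic != 'DoNotExist'):
--             if topic == previous_topic:
--                 doc_labels[previous_topic_ind] = 'I-'
--
--             previous_topic_ind = ind
--             previous_topic = topic
--     return doc_labels
-- ===== SOURCE B (Python) =====
-- def obtain_smooth_boundaries(doc_labels):
--     # Phase 1: group the valid positions into maximal runs of equal topic.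
--     runs = []  # each run is [list_of_indices, topic]
--     for i, t in enumerate(doc_labels):
--         if t != 'I-' and t != 'DoNotExist':
--             if runs and runs[-1][1] == t:
--                 runs[-1][0].append(i)
--             else:
--                 runs.append([[i], t])
--     # Phase 2: within each run, only the last occurrence keeps its label.
--     for idxs, _topic in runs:
--         for i in idxs[:-1]:
--             doc_labels[i] = 'I-'
--     return doc_labels
-- ===== Notes on version B (the rewrite author's own statement) =====
-- stated objective: alternative
-- what changed: B is a run-length-grouping two-phase algorithm: it first builds maximal runs of consecutive equal-topic valid positions, then demotes every index of each run except its last, instead of A's single stateful scan that compares each valid topic with a running previous-topic variable and demotes on the fly.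
import Mathlib
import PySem

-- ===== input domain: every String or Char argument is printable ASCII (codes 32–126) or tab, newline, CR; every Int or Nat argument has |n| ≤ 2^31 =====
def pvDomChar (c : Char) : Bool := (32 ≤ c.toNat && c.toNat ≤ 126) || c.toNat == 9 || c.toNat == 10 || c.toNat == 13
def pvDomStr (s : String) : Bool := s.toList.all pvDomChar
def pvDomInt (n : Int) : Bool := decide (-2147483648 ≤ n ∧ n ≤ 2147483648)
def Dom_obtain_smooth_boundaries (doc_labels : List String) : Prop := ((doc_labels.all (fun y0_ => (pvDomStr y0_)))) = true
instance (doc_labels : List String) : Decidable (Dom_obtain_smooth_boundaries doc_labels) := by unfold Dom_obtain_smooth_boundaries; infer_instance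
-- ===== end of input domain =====

-- B replaces A's single stateful previous-topic scan by a run-length-grouping two-phase
-- algorithm (build maximal equal-topic runs of valid positions, then demote all but the last
-- index of each run); same cost ("alternative"). Both Pythons mutate the input list in place
-- and return it: the equivalence proved here is about the returned value.

-- ===== PORT A =====
-- A's loop: state = (current list, previous_topic_ind, previous_topic), iterating enumerate(doc_labels).
-- (Mutations only touch indices strictly before the cursor, so reading topics from the original
-- enumeration is exact for Python's live iteration.)
def pvGoA : List (Int × String) → List String → Option Int → Option String → List String
  | [], acc, _, _ => acc
  | (ind, topic) :: rest, acc, pInd, pTop =>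
    if topic ≠ "I-" ∧ topic ≠ "DoNotExist" then
      pvGoA rest
        (if pTop == some topic then
          (match pInd with
           | some i => PySem.List.pySetD acc i "I-"
           | none => acc)   -- unreachable: previous_topic set ⇒ previous_topic_ind set
         else acc)
        (some ind) (some topic)
    else pvGoA rest acc pInd pTop

def obtain_smooth_boundaries (doc_labels : List String) : List String :=
  pvGoA (PySem.List.enumerate doc_labels) doc_labels none none

-- ===== PORT B =====
-- Phase 1 of Source B. runs is kept most-recent-run-first (the standard transliteration of
-- Python's append-at-end / mutate runs[-1]; undone by .reverse below).
def pvBuildRuns : List (Int × String) → List (List Int × String) → List (List Int × String)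
  | [], runs => runs
  | (i, t) :: rest, runs =>
    if t != "I-" && t != "DoNotExist" then
      match runs with
      | (idxs, t') :: rs =>
        if t' == t then pvBuildRuns rest ((idxs ++ [i], t') :: rs)
        else pvBuildRuns rest (([i], t) :: (idxs, t') :: rs)
      | [] => pvBuildRuns rest [([i], t)]
    else pvBuildRuns rest runs

-- Phase 2 of Source B; r.1.dropLast is exactly Python's idxs[:-1].
def obtain_smooth_boundaries_alt (doc_labels : List String) : List String :=
  let runs := (pvBuildRuns (PySem.List.enumerate doc_labels) []).reverse
  runs.foldl (fun acc r => (r.1.dropLast).foldl (fun a i => PySem.List.pySetD a i "I-") acc) doc_labels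

-- ===== PRECONDITION & SPEC =====
def Spec_obtain_smooth_boundaries (doc_labels : List String) (out : List String) : Prop := out = obtain_smooth_boundaries_alt doc_labels
instance (doc_labels : List String) (out : List String) : Decidable (Spec_obtain_smooth_boundaries doc_labels out) := by unfold Spec_obtain_smooth_boundaries; infer_instance

-- ===== CLAIM =====
def Claim_equal_obtain_smooth_boundaries : Prop := ∀ (doc_labels : List String), Dom_obtain_smooth_boundaries doc_labels → Spec_obtain_smooth_boundaries doc_labels (obtain_smooth_boundaries doc_labels)

-- ===== LEMMAS AND PROOFS =====

-- Both sides reduce to: fold pySetD "I-" over one list of demoted indices.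
def pvDemote (acc : List String) (is : List Int) : List String :=
  is.foldl (fun a i => PySem.List.pySetD a i "I-") acc

-- the demoted indices, read off the valid list pairwise (A's shape)
def pvDem (vs : List (Int × String)) : List Int :=
  (vs.zip vs.tail).filterMap (fun pq => if pq.1.2 == pq.2.2 then some pq.1.1 else none)

-- one step of B's phase-1 loop, as a fold step
def pvAddRun (runs : List (List Int × String)) (x : Int × String) : List (List Int × String) :=
  match runs with
  | (idxs, t') :: rs => if t' == x.2 then (idxs ++ [x.1], t') :: rs else ([x.1], x.2) :: (idxs, t') :: rs
  | [] => [([x.1], x.2)]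

-- the demoted indices, read off a runs structure (B's shape)
def pvFlatDrop (runs : List (List Int × String)) : List Int :=
  runs.reverse.flatMap (fun r => r.1.dropLast)

def pvLastInfo (runs : List (List Int × String)) : Option (Int × String) :=
  match runs with
  | (idxs, t) :: _ => idxs.getLast?.map (fun i => (i, t))
  | [] => none

def pvCond (o : Option (Int × String)) (x : Int × String) : List Int :=
  match o with
  | some q => if q.2 == x.2 then [q.1] else []
  | none => []

-- ---- A-side: pvGoA = pair-fold (carrying the previous valid pair) ----
def pvGoPairs : Option (Int × String) → List (Int × String) → List String → List String
  | _, [], acc => acc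
  | none, p :: rest, acc => pvGoPairs (some p) rest acc
  | some q, p :: rest, acc =>
      pvGoPairs (some p) rest (if q.2 == p.2 then PySem.List.pySetD acc q.1 "I-" else acc)

theorem pvGoA_eq_goPairs (ps : List (Int × String)) :
    ∀ (acc : List String) (o : Option (Int × String)),
      pvGoA ps acc (o.map (·.1)) (o.map (·.2))
        = pvGoPairs o (ps.filter (fun p => p.2 != "I-" && p.2 != "DoNotExist")) acc := by
  induction ps with
  | nil => intro acc o; cases o <;> simp [pvGoA, pvGoPairs]
  | cons hd rest ih =>
    intro acc o
    obtain ⟨ind, topic⟩ := hd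
    by_cases h : topic ≠ "I-" ∧ topic ≠ "DoNotExist"
    · have hb : (topic != "I-" && topic != "DoNotExist") = true := by
        simp [bne]; exact h
      cases o with
      | none =>
        simp only [pvGoA, List.filter_cons, hb, if_pos h, Option.map_none]
        have := ih (acc := acc) (o := some (ind, topic))
        simpa [pvGoPairs] using this
      | some q =>
        obtain ⟨pi, pt⟩ := q
        simp only [pvGoA, List.filter_cons, hb, if_pos h, Option.map_some]
        have := ih (acc := if pt == topic then PySem.List.pySetD acc pi "I-" else acc)
          (o := some (ind, topic))
        simpa [pvGoPairs] using this
    · have hb : (topic != "I-" && topic != "DoNotExist") = false := by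
        simp [bne]; tauto
      simp only [pvGoA, List.filter_cons, hb, if_neg h]
      exact ih acc o

theorem pvGoPairs_some_eq_demote (vs : List (Int × String)) :
    ∀ (q : Int × String) (acc : List String),
      pvGoPairs (some q) vs acc = pvDemote acc (pvDem (q :: vs)) := by
  induction vs with
  | nil => intro q acc; simp [pvGoPairs, pvDem, pvDemote]
  | cons p rest ih =>
    intro q acc
    by_cases h : q.2 = p.2 <;>
      simp [pvGoPairs, h, pvDem, pvDemote, ih p]

theorem pvGoPairs_none_eq_demote (vs : List (Int × String)) (acc : List String) :
    pvGoPairs none vs acc = pvDemote acc (pvDem vs) := by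
  cases vs with
  | nil => simp [pvGoPairs, pvDem, pvDemote]
  | cons p rest =>
    have : pvDem (p :: rest) = pvDem (p :: rest) := rfl
    simpa [pvGoPairs] using pvGoPairs_some_eq_demote rest p acc

-- ---- B-side ----
theorem pvBuildRuns_eq_foldl (ps : List (Int × String)) :
    ∀ (runs : List (List Int × String)),
      pvBuildRuns ps runs
        = (ps.filter (fun p => p.2 != "I-" && p.2 != "DoNotExist")).foldl pvAddRun runs := by
  induction ps with
  | nil => intro runs; simp [pvBuildRuns]
  | cons hd rest ih =>
    intro runs
    obtain ⟨i, t⟩ := hd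
    by_cases hb : (t != "I-" && t != "DoNotExist") = true
    · cases runs with
      | nil => simp [pvBuildRuns, hb, ih, pvAddRun]
      | cons r rs =>
        obtain ⟨idxs, t'⟩ := r
        by_cases ht : t' == t
        · simp [pvBuildRuns, hb, ht, ih, pvAddRun]
        · simp [pvBuildRuns, hb, ht, ih, pvAddRun]
    · simp [pvBuildRuns, hb, ih]

theorem foldl_runs_eq_demote (rs : List (List Int × String)) :
    ∀ (acc : List String),
      rs.foldl (fun acc r => (r.1.dropLast).foldl (fun a i => PySem.List.pySetD a i "I-") acc) acc
        = pvDemote acc (rs.flatMap (fun r => r.1.dropLast)) := by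
  induction rs with
  | nil => intro acc; simp [pvDemote]
  | cons r rest ih =>
    intro acc
    simp [pvDemote, List.foldl_append, ih, List.flatMap_cons]

theorem pvFlatDrop_addRun (runs : List (List Int × String)) (x : Int × String) :
    pvFlatDrop (pvAddRun runs x) = pvFlatDrop runs ++ pvCond (pvLastInfo runs) x := by
  cases runs with
  | nil => simp [pvAddRun, pvFlatDrop, pvLastInfo, pvCond]
  | cons r rs =>
    obtain ⟨idxs, t'⟩ := r
    by_cases ht : t' == x.2
    · have ht' : t' = x.2 := by simpa using ht
      cases hL : idxs.getLast? with
      | none =>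
        have : idxs = [] := List.getLast?_eq_none_iff.mp hL
        subst this
        simp [pvAddRun, ht, pvFlatDrop, pvLastInfo, pvCond]
      | some a =>
        obtain ⟨l', rfl⟩ := List.getLast?_eq_some_iff.mp hL
        simp [pvAddRun, ht', pvFlatDrop, pvLastInfo, pvCond]
    · have ht' : ¬ t' = x.2 := by simpa using ht
      cases hL : idxs.getLast? <;>
        simp [pvAddRun, ht, pvFlatDrop, pvLastInfo, pvCond, hL]

theorem pvLastInfo_addRun (runs : List (List Int × String)) (x : Int × String) :
    pvLastInfo (pvAddRun runs x) = some x := by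
  cases runs with
  | nil => simp [pvAddRun, pvLastInfo]
  | cons r rs =>
    obtain ⟨idxs, t'⟩ := r
    by_cases ht : t' == x.2
    · have : t' = x.2 := by simpa using ht
      simp [pvAddRun, pvLastInfo, this]
    · simp [pvAddRun, ht, pvLastInfo]

-- pairwise demoted indices grow at the right end
theorem pvDem_cons_cons (a b : Int × String) (m : List (Int × String)) :
    pvDem (a :: b :: m)
      = (if a.2 == b.2 then [a.1] else []) ++ pvDem (b :: m) := by
  by_cases h : a.2 = b.2 <;> simp [pvDem, h]

theorem pvDem_append (l : List (Int × String)) (x : Int × String) :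
    pvDem (l ++ [x]) = pvDem l ++ pvCond l.getLast? x := by
  induction l with
  | nil => simp [pvDem, pvCond]
  | cons a l ih =>
    cases l with
    | nil => by_cases h : a.2 = x.2 <;> simp [pvDem, pvCond, h]
    | cons b l' =>
      have h1 : pvDem (a :: b :: (l' ++ [x]))
          = (if a.2 == b.2 then [a.1] else []) ++ pvDem (b :: (l' ++ [x])) :=
        pvDem_cons_cons a b (l' ++ [x])
      have h2 := pvDem_cons_cons a b l'
      simp only [List.cons_append] at *
      rw [h1, ih, h2, List.getLast?_cons_cons, List.append_assoc]

-- the main invariant of B's phase 1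
theorem pvFoldAddRun_inv (vs : List (Int × String)) :
    pvFlatDrop (vs.foldl pvAddRun []) = pvDem vs
      ∧ pvLastInfo (vs.foldl pvAddRun []) = vs.getLast? := by
  induction vs using List.reverseRecOn with
  | nil => simp [pvFlatDrop, pvDem, pvLastInfo]
  | append_singleton l x ih =>
    obtain ⟨h1, h2⟩ := ih
    constructor
    · rw [List.foldl_append, List.foldl_cons, List.foldl_nil, pvFlatDrop_addRun, h1, h2,
        pvDem_append]
    · rw [List.foldl_append, List.foldl_cons, List.foldl_nil, pvLastInfo_addRun]
      simp

-- ===== VERDICT =====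
theorem obtain_smooth_boundaries_spec : Claim_equal_obtain_smooth_boundaries := by
  intro doc_labels _
  show obtain_smooth_boundaries doc_labels = obtain_smooth_boundaries_alt doc_labels
  unfold obtain_smooth_boundaries obtain_smooth_boundaries_alt
  have hA := pvGoA_eq_goPairs (PySem.List.enumerate doc_labels) doc_labels none
  simp only [Option.map_none] at hA
  rw [hA, pvGoPairs_none_eq_demote]
  rw [pvBuildRuns_eq_foldl, foldl_runs_eq_demote]
  have := (pvFoldAddRun_inv ((PySem.List.enumerate doc_labels).filter
    (fun p => p.2 != "I-" && p.2 != "DoNotExist"))).1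
  rw [← this]
  rfl
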